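-- pv_equiv track=rewrite | github.com/suidpit/nrftw-save-editor | scripts/build_catalog_v2.py | extract_effect_text
-- ===== SOURCE A (Python) =====
-- def extract_effect_text(lines: list[str], fields: dict[str, str]) -> str | None:
--     for key, value in fields.items():
--         if any(hint in key.lower() for hint in ("effect", "bonus", "description")):
--             return value
--     for line in lines:
--         if 10 <= len(line) <= 240 and any(ch.isdigit() for ch in line):
--             return line
--     for line in lines:
--         if 10 <= len(line) <= 240:
--             return line
--     return None
-- ===== SOURCE B (Python) =====
-- def extract_effect_text(lines: list[str], fields: dict[str, str]) -> str | None: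
--     for key, value in fields.items():
--         if any(hint in key.lower() for hint in ("effect", "bonus", "description")):
--             return value
--     fallback = None
--     for line in lines:
--         if 10 <= len(line) <= 240:
--             if any(ch.isdigit() for ch in line):
--                 return line
--             if fallback is None:
--                 fallback = line
--     return fallback
-- ===== Notes on version B (the rewrite author's own statement) =====
-- stated objective: simpler
-- what changed: The two separate scans over lines (digit-priority pass, then length-only pass) are merged into one single pass that returns a digit line eagerly and keeps the first length-valid line as a fallback returned after the loop.
import Mathlib
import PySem

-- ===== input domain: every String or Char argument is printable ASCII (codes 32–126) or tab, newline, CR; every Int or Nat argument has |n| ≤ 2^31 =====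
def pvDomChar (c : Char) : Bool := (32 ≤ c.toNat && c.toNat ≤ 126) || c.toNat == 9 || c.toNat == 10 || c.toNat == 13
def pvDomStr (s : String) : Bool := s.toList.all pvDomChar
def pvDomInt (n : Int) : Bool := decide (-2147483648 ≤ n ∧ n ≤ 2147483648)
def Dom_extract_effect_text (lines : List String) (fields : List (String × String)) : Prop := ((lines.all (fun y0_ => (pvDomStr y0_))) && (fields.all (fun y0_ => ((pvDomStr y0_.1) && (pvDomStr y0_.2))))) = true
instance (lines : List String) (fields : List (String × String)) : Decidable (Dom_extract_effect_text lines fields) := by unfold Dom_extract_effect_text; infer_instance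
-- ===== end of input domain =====

-- B merges A's two scans over `lines` into one pass with a fallback variable; return value only, no side effects.

-- shared helpers (both Pythons use the identical tests)
def pvHintKey (key : String) : Bool :=
  ["effect", "bonus", "description"].any (fun h => PySem.Str.isIn h (PySem.Str.lower key))

def pvLenOK (line : String) : Bool :=
  decide (10 ≤ PySem.Str.len line) && decide (PySem.Str.len line ≤ 240)

def pvHasDigit (line : String) : Bool := line.toList.any PySem.Chars.isdigit

-- ===== PORT A =====
def extract_effect_text (lines : List String) (fields : List (String × String)) : Option String :=
  match fields.find? (fun kv => pvHintKey kv.1) with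
  | some kv => some kv.2
  | none =>
    match lines.find? (fun l => pvLenOK l && pvHasDigit l) with
    | some l => some l
    | none => lines.find? pvLenOK

-- ===== PORT B =====
-- single pass: return a digit line eagerly, remember the first length-valid line as fallback
def pvScan : List String → Option String → Option String
  | [], fb => fb
  | l :: rest, fb =>
    if pvLenOK l then
      if pvHasDigit l then some l
      else pvScan rest (if fb = none then some l else fb)
    else pvScan rest fb

def extract_effect_text_alt (lines : List String) (fields : List (String × String)) : Option String :=
  match fields.find? (fun kv => pvHintKey kv.1) with
  | some kv => some kv.2
  | none => pvScan lines none

-- ===== PRECONDITION & SPEC =====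
def Spec_extract_effect_text (lines : List String) (fields : List (String × String)) (out : Option String) : Prop := out = extract_effect_text_alt lines fields
instance (lines : List String) (fields : List (String × String)) (out : Option String) : Decidable (Spec_extract_effect_text lines fields out) := by unfold Spec_extract_effect_text; infer_instance

-- ===== CLAIM (what is proved, stated in full; the proofs are below) =====
def Claim_equal_extract_effect_text : Prop := ∀ (lines : List String) (fields : List (String × String)), Dom_extract_effect_text lines fields → Spec_extract_effect_text lines fields (extract_effect_text lines fields)

-- ===== LEMMAS AND PROOFS =====

lemma pvScan_eq (lines : List String) (fb : Option String) :
    pvScan lines fb =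
      match lines.find? (fun l => pvLenOK l && pvHasDigit l) with
      | some l => some l
      | none =>
        match fb with
        | some x => some x
        | none => lines.find? pvLenOK := by
  induction lines generalizing fb with
  | nil => cases fb <;> simp [pvScan]
  | cons l rest ih =>
    by_cases hlen : pvLenOK l = true
    · by_cases hd : pvHasDigit l = true
      · simp [pvScan, hlen, hd, List.find?]
      · cases fb <;> simp [pvScan, hlen, hd, List.find?, ih]
    · simp only [Bool.not_eq_true] at hlen
      cases fb <;> simp [pvScan, hlen, List.find?, ih]

-- ===== VERDICT (by name: the statement is the Claim_ definition above) =====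
theorem extract_effect_text_spec : Claim_equal_extract_effect_text := by
  intro lines fields _
  unfold Spec_extract_effect_text extract_effect_text extract_effect_text_alt
  cases fields.find? (fun kv => pvHintKey kv.1) with
  | some kv => rfl
  | none => simp [pvScan_eq]
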